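-- pv_equiv track=rewrite | github.com/edgebips/baskets | baskets/csv_utils.py | csv_split_sections
-- ===== SOURCE A (Python) =====
-- def csv_split_sections(rows):
--     """Given rows, split them in at empty lines.
--     This is useful for structured CSV files with multiple sections.
--
--     Args:
--       rows: A list of rows, which are themselves lists of strings.
--     Returns:
--       A list of sections, which are lists of rows, which are lists of strings.
--     """
--     sections = []
--     current_section = []
--     for row in rows:
--         if row:
--             current_section.append(row)
--         else:
--             sections.append(current_section)
--             current_section = []
--     if current_section:
--         sections.append(current_section)
--     return sections
-- ===== SOURCE B (Python) =====
-- def csv_split_sections(rows):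
--     """Split rows into sections at empty lines (boundary-slicing re-implementation)."""
--     positions = [i for i, row in enumerate(rows) if not row]
--     sections = []
--     start = 0
--     for pos in positions:
--         sections.append(rows[start:pos])
--         start = pos + 1
--     if start < len(rows):
--         sections.append(rows[start:])
--     return sections
-- ===== Notes on version B (the rewrite author's own statement) =====
-- stated objective: alternative
-- what changed: B first collects the indices of the empty rows in one pass and then builds each section by slicing rows between consecutive boundaries, instead of A's single accumulator loop that grows the current section row by row.
import Mathlib
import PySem

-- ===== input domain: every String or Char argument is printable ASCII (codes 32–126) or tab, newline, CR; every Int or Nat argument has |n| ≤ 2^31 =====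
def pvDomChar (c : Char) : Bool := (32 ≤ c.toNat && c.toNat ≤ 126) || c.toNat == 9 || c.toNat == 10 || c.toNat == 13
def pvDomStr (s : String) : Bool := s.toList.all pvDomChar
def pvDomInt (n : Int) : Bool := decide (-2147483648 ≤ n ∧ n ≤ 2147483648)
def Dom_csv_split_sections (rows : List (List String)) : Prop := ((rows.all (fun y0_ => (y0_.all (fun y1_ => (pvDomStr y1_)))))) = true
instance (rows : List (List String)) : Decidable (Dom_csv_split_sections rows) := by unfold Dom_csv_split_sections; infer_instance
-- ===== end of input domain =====

-- B collects the empty-row boundary indices in one pass and slices the row list between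
-- consecutive boundaries, instead of A's accumulator loop growing the current section row
-- by row (alternative decomposition, same linear cost).

-- ===== PORT A =====
def csv_split_sections (rows : List (List String)) : List (List (List String)) :=
  let st := rows.foldl
    (fun (st : List (List (List String)) × List (List String)) row =>
      if row ≠ [] then (st.1, st.2 ++ [row]) else (st.1 ++ [st.2], []))
    ([], [])
  if st.2 ≠ [] then st.1 ++ [st.2] else st.1

-- ===== PORT B =====
def csv_split_sections_alt (rows : List (List String)) : List (List (List String)) :=
  let positions := ((PySem.List.enumerate rows 0).filter (fun p => p.2.isEmpty)).map (·.1)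
  let st := positions.foldl
    (fun (st : List (List (List String)) × Int) pos =>
      (st.1 ++ [PySem.List.slice rows (some st.2) (some pos)], pos + 1))
    ([], 0)
  if st.2 < (rows.length : Int) then st.1 ++ [PySem.List.slice rows (some st.2) none] else st.1

-- ===== PRECONDITION & SPEC =====
def Spec_csv_split_sections (rows : List (List String)) (out : List (List (List String))) : Prop := out = csv_split_sections_alt rows
instance (rows : List (List String)) (out : List (List (List String))) : Decidable (Spec_csv_split_sections rows out) := by unfold Spec_csv_split_sections; infer_instance

-- ===== CLAIM (what is proved, stated in full; the proofs are below) =====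
def Claim_equal_csv_split_sections : Prop := ∀ (rows : List (List String)), Dom_csv_split_sections rows → Spec_csv_split_sections rows (csv_split_sections rows)

-- ===== LEMMAS AND PROOFS =====

/-- Common recursive description of the section split (proof device). -/
def pvG : List (List String) → List (List (List String))
  | [] => []
  | r :: rs =>
    if r = [] then [] :: pvG rs
    else match pvG rs with
      | [] => [[r]]
      | s :: ss => (r :: s) :: ss

/-- Prepend `cur` onto the head section (or emit it alone if nonempty). -/
def pvConsHead (cur : List (List String)) : List (List (List String)) → List (List (List String))
  | [] => if cur = [] then [] else [cur]
  | s :: ss => (cur ++ s) :: ss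

lemma pvA_fold_eq : ∀ (rows : List (List String)) (secs : List (List (List String))) (cur : List (List String)),
    (let st := rows.foldl
      (fun (st : List (List (List String)) × List (List String)) row =>
        if row ≠ [] then (st.1, st.2 ++ [row]) else (st.1 ++ [st.2], []))
      (secs, cur)
     if st.2 ≠ [] then st.1 ++ [st.2] else st.1) = secs ++ pvConsHead cur (pvG rows) := by
  intro rows
  induction rows with
  | nil =>
    intro secs cur
    by_cases h : cur = [] <;> simp [pvG, pvConsHead, h]
  | cons r rs ih =>
    intro secs cur
    by_cases h : r = []
    · subst h
      have step : List.foldl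
          (fun (st : List (List (List String)) × List (List String)) row =>
            if row ≠ [] then (st.1, st.2 ++ [row]) else (st.1 ++ [st.2], []))
          (secs, cur) ([] :: rs)
          = List.foldl
          (fun (st : List (List (List String)) × List (List String)) row =>
            if row ≠ [] then (st.1, st.2 ++ [row]) else (st.1 ++ [st.2], []))
          (secs ++ [cur], []) rs := rfl
      simp only [step]
      rw [ih]
      simp only [pvG]
      cases hg : pvG rs with
      | nil => simp [pvConsHead]
      | cons s ss => simp [pvConsHead]
    · simp only [List.foldl_cons]
      rw [if_pos (show r ≠ [] from h)]
      rw [ih]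
      simp only [pvG, if_neg h]
      cases hg : pvG rs with
      | nil => simp [pvConsHead]
      | cons s ss => simp [pvConsHead]

lemma pvA_eq_G (rows : List (List String)) : csv_split_sections rows = pvG rows := by
  have := pvA_fold_eq rows [] []
  simp only [csv_split_sections]
  rw [this]
  cases hg : pvG rows with
  | nil => simp [pvConsHead]
  | cons s ss => simp [pvConsHead]

/-- The boundary indices B collects (proof device; mirrors the comprehension). -/
def pvPos (rows : List (List String)) : List Int :=
  ((PySem.List.enumerate rows 0).filter (fun p => p.2.isEmpty)).map (·.1)

lemma pvEnumerate_shift {α : Type} (xs : List α) (s : Int) :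
    PySem.List.enumerate xs (s + 1) = (PySem.List.enumerate xs s).map (fun p => (p.1 + 1, p.2)) := by
  induction xs generalizing s with
  | nil => simp [PySem.List.enumerate_nil]
  | cons x xs ih =>
    rw [PySem.List.enumerate_cons, PySem.List.enumerate_cons, List.map_cons]
    rw [ih (s + 1)]

lemma pvPos_cons (r : List String) (rows : List (List String)) :
    pvPos (r :: rows) = if r = [] then (0 : Int) :: (pvPos rows).map (· + 1)
                        else (pvPos rows).map (· + 1) := by
  simp only [pvPos, PySem.List.enumerate_cons, List.filter_cons]
  rw [show (0 : Int) + 1 = 0 + 1 from rfl, pvEnumerate_shift]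
  by_cases h : r = []
  · simp [h, List.filter_map, List.map_map, Function.comp_def]
  · simp [h, List.isEmpty_iff, List.filter_map, List.map_map, Function.comp_def]

lemma pvPos_nonneg : ∀ (rows : List (List String)) (p : Int), p ∈ pvPos rows → 0 ≤ p := by
  intro rows
  induction rows with
  | nil => intro p hp; simp [pvPos, PySem.List.enumerate_nil] at hp
  | cons r rs ih =>
    intro p hp
    rw [pvPos_cons] at hp
    by_cases h : r = []
    · simp [h] at hp
      rcases hp with h0 | ⟨q, hq, rfl⟩
      · omega
      · have := ih q hq; omega
    · simp [h] at hp
      rcases hp with ⟨q, hq, rfl⟩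
      have := ih q hq; omega

/-- B's slicing loop (proof device). -/
def pvBfold (rows : List (List String)) (ps : List Int)
    (secs : List (List (List String))) (s : Int) : List (List (List String)) × Int :=
  ps.foldl
    (fun (st : List (List (List String)) × Int) pos =>
      (st.1 ++ [PySem.List.slice rows (some st.2) (some pos)], pos + 1))
    (secs, s)

lemma pvBfold_prefix : ∀ (ps : List Int) (rows : List (List String)) (secs : List (List (List String))) (s : Int),
    pvBfold rows ps secs s = (secs ++ (pvBfold rows ps [] s).1, (pvBfold rows ps [] s).2) := by
  intro ps
  induction ps with
  | nil => intro rows secs s; simp [pvBfold]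
  | cons p ps ih =>
    intro rows secs s
    have e1 : pvBfold rows (p :: ps) secs s
        = pvBfold rows ps (secs ++ [PySem.List.slice rows (some s) (some p)]) (p + 1) := rfl
    have e2 : pvBfold rows (p :: ps) ([] : List (List (List String))) s
        = pvBfold rows ps ([] ++ [PySem.List.slice rows (some s) (some p)]) (p + 1) := rfl
    rw [e1, e2, ih rows (secs ++ [PySem.List.slice rows (some s) (some p)]) (p + 1),
        ih rows ([] ++ [PySem.List.slice rows (some s) (some p)]) (p + 1)]
    simp

lemma pvBfold_start_nonneg : ∀ (ps : List Int) (rows : List (List String)) (secs : List (List (List String))) (s : Int),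
    (∀ p ∈ ps, 0 ≤ p) → 0 ≤ s → 0 ≤ (pvBfold rows ps secs s).2 := by
  intro ps
  induction ps with
  | nil => intro rows secs s _ hs; simpa [pvBfold] using hs
  | cons p ps ih =>
    intro rows secs s hps _
    simp only [pvBfold, List.foldl_cons]
    exact ih rows _ (p + 1) (fun q hq => hps q (List.mem_cons_of_mem _ hq))
      (by have := hps p (List.mem_cons_self); omega)

lemma pvSlice_shift (r : List String) (rows : List (List String)) {s p : Int}
    (hs : 0 ≤ s) (hp : 0 ≤ p) :
    PySem.List.slice (r :: rows) (some (s + 1)) (some (p + 1)) = PySem.List.slice rows (some s) (some p) := by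
  rw [PySem.List.slice_toNat _ (by omega) (by omega), PySem.List.slice_toNat _ hs hp]
  rw [show (s + 1).toNat = s.toNat + 1 by omega, show (p + 1).toNat = p.toNat + 1 by omega]
  simp

lemma pvSliceFrom_shift (r : List String) (rows : List (List String)) {s : Int} (hs : 0 ≤ s) :
    PySem.List.slice (r :: rows) (some (s + 1)) none = PySem.List.slice rows (some s) none := by
  rw [PySem.List.slice_from _ (by omega), PySem.List.slice_from _ hs]
  rw [show (s + 1).toNat = s.toNat + 1 by omega]
  simp

lemma pvBfold_shift : ∀ (ps : List Int) (rows : List (List String)) (r : List String)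
    (secs : List (List (List String))) (s : Int), (∀ p ∈ ps, 0 ≤ p) → 0 ≤ s →
    pvBfold (r :: rows) (ps.map (· + 1)) secs (s + 1)
      = ((pvBfold rows ps secs s).1, (pvBfold rows ps secs s).2 + 1) := by
  intro ps
  induction ps with
  | nil => intro rows r secs s _ _; simp [pvBfold]
  | cons p ps ih =>
    intro rows r secs s hps hs
    have hp : 0 ≤ p := hps p (List.mem_cons_self)
    simp only [List.map_cons, pvBfold, List.foldl_cons]
    rw [pvSlice_shift r rows hs hp]
    have := ih rows r (secs ++ [PySem.List.slice rows (some s) (some p)]) (p + 1)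
      (fun q hq => hps q (List.mem_cons_of_mem _ hq)) (by omega)
    simpa [pvBfold] using this

/-- B written through the proof devices. -/
lemma pvB_unfold (rows : List (List String)) :
    csv_split_sections_alt rows =
      (if (pvBfold rows (pvPos rows) [] 0).2 < (rows.length : Int)
       then (pvBfold rows (pvPos rows) [] 0).1 ++ [PySem.List.slice rows (some (pvBfold rows (pvPos rows) [] 0).2) none]
       else (pvBfold rows (pvPos rows) [] 0).1) := rfl

lemma pvB_eq_G : ∀ (rows : List (List String)), csv_split_sections_alt rows = pvG rows := by
  intro rows
  induction rows with
  | nil => rfl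
  | cons r rs ih =>
    rw [pvB_unfold] at ih ⊢
    by_cases h : r = []
    · subst h
      have hpc : pvPos ([] :: rs) = (0 : Int) :: (pvPos rs).map (· + 1) := by
        rw [pvPos_cons]; simp
      rw [hpc]
      have hstep : pvBfold ([] :: rs) ((0 : Int) :: (pvPos rs).map (· + 1)) [] 0
          = pvBfold ([] :: rs) ((pvPos rs).map (· + 1)) [PySem.List.slice ([] :: rs) (some 0) (some 0)] 1 := by
        simp [pvBfold]
      have hsl : PySem.List.slice ([] :: rs) (some (0:Int)) (some (0:Int)) = ([] : List (List String)) := by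
        rw [PySem.List.slice_toNat _ le_rfl le_rfl]; simp
      rw [hstep, hsl]
      have hsh := pvBfold_shift (pvPos rs) rs [] [([] : List (List String))] 0 (pvPos_nonneg rs) le_rfl
      norm_num at hsh
      rw [hsh]
      rw [pvBfold_prefix (pvPos rs) rs [([] : List (List String))] 0]
      have hnn := pvBfold_start_nonneg (pvPos rs) rs [] 0 (pvPos_nonneg rs) le_rfl
      rw [pvSliceFrom_shift [] rs hnn]
      have hg : pvG ([] :: rs) = [] :: pvG rs := rfl
      rw [hg, ← ih]
      by_cases hlt : (pvBfold rs (pvPos rs) [] 0).2 < (rs.length : Int)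
      · rw [if_pos (by simp only [List.length_cons]; push_cast; omega), if_pos hlt]
        simp
      · rw [if_neg (by simp only [List.length_cons]; push_cast; omega), if_neg hlt]
        simp
    · rw [pvPos_cons, if_neg h]
      cases hps : pvPos rs with
      | nil =>
        simp only [List.map_nil]
        have hB : pvBfold (r :: rs) [] ([] : List (List (List String))) 0 = ([], 0) := rfl
        have hB' : pvBfold rs [] ([] : List (List (List String))) 0 = ([], 0) := rfl
        rw [hB]
        rw [hps, hB'] at ih
        rw [if_pos (by simp only [List.length_cons]; push_cast; omega)]
        rw [PySem.List.slice_from _ le_rfl]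
        simp only [Int.toNat_zero, List.drop_zero, List.nil_append]
        simp only [pvG]
        rw [if_neg h]
        cases rs with
        | nil => simp [pvG]
        | cons x xs =>
          rw [if_pos (by simp only [List.length_cons]; push_cast; omega),
              PySem.List.slice_from _ le_rfl] at ih
          simp only [Int.toNat_zero, List.drop_zero, List.nil_append] at ih
          rw [← ih]
      | cons p ps' =>
        have hp : 0 ≤ p := pvPos_nonneg rs p (by rw [hps]; exact List.mem_cons_self)
        have hps' : ∀ q ∈ ps', 0 ≤ q := fun q hq => pvPos_nonneg rs q (by rw [hps]; exact List.mem_cons_of_mem _ hq)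
        -- unfold first step of both folds
        have hstepL : pvBfold (r :: rs) ((p + 1) :: ps'.map (· + 1)) [] 0
            = pvBfold (r :: rs) (ps'.map (· + 1)) [PySem.List.slice (r :: rs) (some 0) (some (p + 1))] (p + 1 + 1) := by
          simp [pvBfold]
        have hstepR : pvBfold rs (p :: ps') [] 0
            = pvBfold rs ps' [PySem.List.slice rs (some 0) (some p)] (p + 1) := by
          simp [pvBfold]
        rw [List.map_cons, hstepL]
        rw [hps, hstepR] at ih
        have hsl0 : PySem.List.slice (r :: rs) (some (0:Int)) (some (p + 1))
            = r :: PySem.List.slice rs (some (0:Int)) (some p) := by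
          rw [PySem.List.slice_toNat _ le_rfl (by omega), PySem.List.slice_toNat _ le_rfl hp]
          rw [show (p + 1).toNat = p.toNat + 1 by omega]
          simp
        rw [hsl0]
        rw [pvBfold_shift ps' rs r _ (p + 1) hps' (by omega)]
        rw [pvBfold_prefix ps' rs [r :: PySem.List.slice rs (some 0) (some p)] (p + 1)]
        rw [pvBfold_prefix ps' rs [PySem.List.slice rs (some 0) (some p)] (p + 1)] at ih
        have hnn := pvBfold_start_nonneg ps' rs [] (p + 1) hps' (by omega)
        rw [pvSliceFrom_shift r rs hnn]
        simp only [pvG]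
        rw [if_neg h]
        rw [← ih]
        by_cases hlt : (pvBfold rs ps' [] (p + 1)).2 < (rs.length : Int)
        · rw [if_pos (by simp only [List.length_cons]; push_cast; omega), if_pos hlt]
          simp
        · rw [if_neg (by simp only [List.length_cons]; push_cast; omega), if_neg hlt]
          simp

-- ===== VERDICT (by name: the statement is the Claim_ definition above) =====
theorem csv_split_sections_spec : Claim_equal_csv_split_sections := by
  intro rows _
  unfold Spec_csv_split_sections
  rw [pvA_eq_G, pvB_eq_G]
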